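-- pv_equiv track=rewrite | github.com/bnb32/project_euler | problem57.py | numerator
-- ===== SOURCE A (Python) =====
-- denoms={}
--
-- numers={}
--
-- def numerator(n):
--     if n==0:
--         return 1
--     else:
--         if (n-1) in denoms:
--             denom=denoms[n-1]
--         else:
--             denom=denominator(n-1)
--             denoms[n-1]=denom
--         if (n-1) in numers:
--             numer=numers[n-1]
--         else:
--             numer=numerator(n-1)
--             numers[n-1]=numer
--         return 2*denom+numer
--
-- def denominator(n):
--     if n==0:
--         return 1
--     else:
--         if (n-1) in denoms:
--             denom=denoms[n-1]
--         else:
--             denom=denominator(n-1)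
--             denoms[n-1]=denom
--         if (n-1) in numers:
--             numer=numers[n-1]
--         else:
--             numer=numerator(n-1)
--             numers[n-1]=numer
--         return denom+numer
-- ===== SOURCE B (Python) =====
-- def numerator(n):
--     num, den = 1, 1
--     for _ in range(n):
--         num, den = 2 * den + num, den + num
--     return num
-- ===== Notes on version B (the rewrite author's own statement) =====
-- stated objective: faster
-- what changed: Replaces the mutually recursive memoized numerator/denominator pair (with global dicts) by a single bottom-up loop maintaining the (numerator, denominator) pair in two locals.
import Mathlib
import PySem

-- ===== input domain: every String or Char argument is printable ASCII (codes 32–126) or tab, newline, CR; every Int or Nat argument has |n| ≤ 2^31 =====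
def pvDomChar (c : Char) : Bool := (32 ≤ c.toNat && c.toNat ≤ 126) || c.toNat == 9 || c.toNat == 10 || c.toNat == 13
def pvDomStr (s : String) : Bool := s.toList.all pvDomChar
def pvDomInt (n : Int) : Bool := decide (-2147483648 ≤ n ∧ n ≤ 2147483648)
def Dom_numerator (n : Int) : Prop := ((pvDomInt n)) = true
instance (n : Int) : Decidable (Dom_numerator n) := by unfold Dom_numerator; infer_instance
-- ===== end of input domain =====

-- B replaces A's mutually recursive memoized numerator/denominator pair by one bottom-up loop
-- over the (numerator, denominator) pair; return values agree for all n ≥ 0 (A raises for n < 0).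

-- ===== PORT A =====
-- A's global memo dicts `denoms`/`numers` are threaded through the mutual recursion as explicit
-- state (fresh at each top-level call; memoization does not change the returned value).
-- The recursion argument is n.toNat: for n ≥ 0 this is exactly A's recursion on n-1;
-- for n < 0 A never reaches its base case (RecursionError), excluded by Pre_numerator.
-- Result triple = (returned value, denoms, numers).
mutual
def pvNumA : Nat → PySem.Dict Int Int → PySem.Dict Int Int →
    Int × PySem.Dict Int Int × PySem.Dict Int Int
  | 0, ds, ns => (1, ds, ns)
  | n+1, ds, ns =>
    match ds.get? (n : Int) with
    | some denom =>
      match ns.get? (n : Int) with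
      | some numer => (2 * denom + numer, ds, ns)
      | none =>
        (2 * denom + (pvNumA n ds ns).1, (pvNumA n ds ns).2.1,
         (pvNumA n ds ns).2.2.insert (n : Int) (pvNumA n ds ns).1)
    | none =>
      match (pvDenA n ds ns).2.2.get? (n : Int) with
      | some numer =>
        (2 * (pvDenA n ds ns).1 + numer,
         (pvDenA n ds ns).2.1.insert (n : Int) (pvDenA n ds ns).1, (pvDenA n ds ns).2.2)
      | none =>
        (2 * (pvDenA n ds ns).1 +
           (pvNumA n ((pvDenA n ds ns).2.1.insert (n : Int) (pvDenA n ds ns).1) (pvDenA n ds ns).2.2).1,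
         (pvNumA n ((pvDenA n ds ns).2.1.insert (n : Int) (pvDenA n ds ns).1) (pvDenA n ds ns).2.2).2.1,
         (pvNumA n ((pvDenA n ds ns).2.1.insert (n : Int) (pvDenA n ds ns).1) (pvDenA n ds ns).2.2).2.2.insert (n : Int)
           (pvNumA n ((pvDenA n ds ns).2.1.insert (n : Int) (pvDenA n ds ns).1) (pvDenA n ds ns).2.2).1)
def pvDenA : Nat → PySem.Dict Int Int → PySem.Dict Int Int →
    Int × PySem.Dict Int Int × PySem.Dict Int Int
  | 0, ds, ns => (1, ds, ns)
  | n+1, ds, ns =>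
    match ds.get? (n : Int) with
    | some denom =>
      match ns.get? (n : Int) with
      | some numer => (denom + numer, ds, ns)
      | none =>
        (denom + (pvNumA n ds ns).1, (pvNumA n ds ns).2.1,
         (pvNumA n ds ns).2.2.insert (n : Int) (pvNumA n ds ns).1)
    | none =>
      match (pvDenA n ds ns).2.2.get? (n : Int) with
      | some numer =>
        ((pvDenA n ds ns).1 + numer,
         (pvDenA n ds ns).2.1.insert (n : Int) (pvDenA n ds ns).1, (pvDenA n ds ns).2.2)
      | none =>
        ((pvDenA n ds ns).1 +
           (pvNumA n ((pvDenA n ds ns).2.1.insert (n : Int) (pvDenA n ds ns).1) (pvDenA n ds ns).2.2).1,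
         (pvNumA n ((pvDenA n ds ns).2.1.insert (n : Int) (pvDenA n ds ns).1) (pvDenA n ds ns).2.2).2.1,
         (pvNumA n ((pvDenA n ds ns).2.1.insert (n : Int) (pvDenA n ds ns).1) (pvDenA n ds ns).2.2).2.2.insert (n : Int)
           (pvNumA n ((pvDenA n ds ns).2.1.insert (n : Int) (pvDenA n ds ns).1) (pvDenA n ds ns).2.2).1)
end

def numerator (n : Int) : Int := (pvNumA n.toNat PySem.Dict.empty PySem.Dict.empty).1

-- ===== PORT B =====
def numerator_alt (n : Int) : Int :=
  ((PySem.List.pyRange 0 n 1).foldl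
    (fun (p : Int × Int) _ => (2 * p.2 + p.1, p.2 + p.1)) (1, 1)).1

-- ===== PRECONDITION & SPEC =====
-- Pre_ excludes n < 0, where A's recursion never reaches its base case and raises RecursionError
-- (for very large n A also hits the interpreter recursion limit; B returns 1 resp. the nth value there).
def Pre_numerator (n : Int) : Prop := 0 ≤ n
instance (n : Int) : Decidable (Pre_numerator n) := by unfold Pre_numerator; infer_instance
def pvWitness_numerator : Int := (5)

def Spec_numerator (n : Int) (out : Int) : Prop := out = numerator_alt n
instance (n : Int) (out : Int) : Decidable (Spec_numerator n out) := by unfold Spec_numerator; infer_instance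

-- ===== CLAIM (what is proved, stated in full; the proofs are below) =====
def Claim_equal_numerator : Prop := ∀ (n : Int), Dom_numerator n → Pre_numerator n → Spec_numerator n (numerator n)

-- ===== LEMMAS AND PROOFS =====

-- the mathematical (numerator, denominator) pair at index k
def pvND : Nat → Int × Int
  | 0 => (1, 1)
  | k + 1 => (2 * (pvND k).2 + (pvND k).1, (pvND k).2 + (pvND k).1)

-- invariant on the threaded memo dicts: every stored value is the true one
def pvInv (ds ns : PySem.Dict Int Int) : Prop :=
  (∀ (k : Nat) v, ds.get? (k : Int) = some v → v = (pvND k).2) ∧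
  (∀ (k : Nat) v, ns.get? (k : Int) = some v → v = (pvND k).1)

def pvGoodN (n : Nat) (r : Int × PySem.Dict Int Int × PySem.Dict Int Int) : Prop :=
  r.1 = (pvND n).1 ∧ pvInv r.2.1 r.2.2

def pvGoodD (n : Nat) (r : Int × PySem.Dict Int Int × PySem.Dict Int Int) : Prop :=
  r.1 = (pvND n).2 ∧ pvInv r.2.1 r.2.2

theorem pvInv_insert_den {ds ns : PySem.Dict Int Int} (h : pvInv ds ns) (n : Nat) :
    pvInv (ds.insert (n : Int) (pvND n).2) ns := by
  refine ⟨fun k v hv => ?_, h.2⟩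
  rw [PySem.Dict.get?_insert] at hv
  split at hv
  · rename_i heq
    have hk : k = n := by exact_mod_cast heq
    cases hv; rw [hk]
  · exact h.1 k v hv

theorem pvInv_insert_num {ds ns : PySem.Dict Int Int} (h : pvInv ds ns) (n : Nat) :
    pvInv ds (ns.insert (n : Int) (pvND n).1) := by
  refine ⟨h.1, fun k v hv => ?_⟩
  rw [PySem.Dict.get?_insert] at hv
  split at hv
  · rename_i heq
    have hk : k = n := by exact_mod_cast heq
    cases hv; rw [hk]
  · exact h.2 k v hv

theorem pvAux_correct (n : Nat) : ∀ ds ns, pvInv ds ns →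
    pvGoodN n (pvNumA n ds ns) ∧ pvGoodD n (pvDenA n ds ns) := by
  induction n with
  | zero => intro ds ns h; exact ⟨⟨rfl, h⟩, ⟨rfl, h⟩⟩
  | succ n ih =>
    intro ds ns h
    constructor
    · show pvGoodN (n + 1) (pvNumA (n + 1) ds ns)
      rw [pvNumA]
      split
      · rename_i denom hd
        split
        · rename_i numer hn
          exact ⟨by rw [h.1 n denom hd, h.2 n numer hn]; rfl, h⟩
        · rename_i hn
          obtain ⟨h1, h2⟩ := (ih ds ns h).1
          refine ⟨by rw [h.1 n denom hd, h1]; rfl, ?_⟩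
          rw [h1]; exact pvInv_insert_num h2 n
      · rename_i hd
        obtain ⟨hd1, hd2⟩ := (ih ds ns h).2
        have hins : pvInv ((pvDenA n ds ns).2.1.insert (n : Int) (pvDenA n ds ns).1)
            (pvDenA n ds ns).2.2 := by
          rw [hd1]; exact pvInv_insert_den hd2 n
        split
        · rename_i numer hn
          exact ⟨by rw [hd1, hd2.2 n numer hn]; rfl, hins⟩
        · rename_i hn
          obtain ⟨h1, h2⟩ := (ih _ _ hins).1
          refine ⟨by rw [h1, hd1]; rfl, ?_⟩
          rw [h1]; exact pvInv_insert_num h2 n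
    · show pvGoodD (n + 1) (pvDenA (n + 1) ds ns)
      rw [pvDenA]
      split
      · rename_i denom hd
        split
        · rename_i numer hn
          exact ⟨by rw [h.1 n denom hd, h.2 n numer hn]; rfl, h⟩
        · rename_i hn
          obtain ⟨h1, h2⟩ := (ih ds ns h).1
          refine ⟨by rw [h.1 n denom hd, h1]; rfl, ?_⟩
          rw [h1]; exact pvInv_insert_num h2 n
      · rename_i hd
        obtain ⟨hd1, hd2⟩ := (ih ds ns h).2
        have hins : pvInv ((pvDenA n ds ns).2.1.insert (n : Int) (pvDenA n ds ns).1)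
            (pvDenA n ds ns).2.2 := by
          rw [hd1]; exact pvInv_insert_den hd2 n
        split
        · rename_i numer hn
          exact ⟨by rw [hd1, hd2.2 n numer hn]; rfl, hins⟩
        · rename_i hn
          obtain ⟨h1, h2⟩ := (ih _ _ hins).1
          refine ⟨by rw [h1, hd1]; rfl, ?_⟩
          rw [h1]; exact pvInv_insert_num h2 n

theorem pvNumerator_eq (n : Int) : numerator n = (pvND n.toNat).1 := by
  have hinv : pvInv PySem.Dict.empty PySem.Dict.empty := by
    constructor <;> intro k v hv <;> simp [PySem.Dict.get?_empty] at hv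
  exact ((pvAux_correct n.toNat PySem.Dict.empty PySem.Dict.empty hinv).1).1

theorem pvAlt_eq (n : Int) : numerator_alt n = (pvND n.toNat).1 := by
  unfold numerator_alt
  rw [PySem.List.pyRange_one]
  have key : ∀ k : Nat,
      ((List.range k).map (fun j : Nat => (0 : Int) + j)).foldl
        (fun (p : Int × Int) _ => (2 * p.2 + p.1, p.2 + p.1)) (1, 1) = pvND k := by
    intro k
    induction k with
    | zero => rfl
    | succ k ih =>
      rw [List.range_succ, List.map_append, List.foldl_append, ih]
      rfl
  rw [show n - 0 = n from by ring, key n.toNat]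

-- ===== VERDICT (by name: the statement is the Claim_ definition above) =====
theorem numerator_spec : Claim_equal_numerator := by
  intro n _ _
  unfold Spec_numerator
  rw [pvNumerator_eq, pvAlt_eq]
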